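-- pv_equiv track=rewrite | github.com/jasonbak/Personal-journal-analysis | process.py | processTEX
-- ===== SOURCE A (Python) =====
-- def processTEX(raw_tex):
--     """Process a raw string (read from a .tex file) of all journal entries from
--     2017 into a 3d list of tuples, described as (day of month, entries from a
--     day).
--
--     Args:
--         raw_tex (string): raw string of entries from a year read from a .tex
--             file
--
--     Returns
--         (3d list of tuples):
--             1d - (day of month, entries from a day)
--             2d - days
--             3d - months
--     """
--     # Ignore all the LaTeX set-up
--     start_idx = raw_tex.find('\section{January}')
--     end_idx = raw_tex.find('\end{document}')
--     usable_str = raw_tex[start_idx:end_idx]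
--     # Split all entries by \n
--     split_entries = usable_str.splitlines()
--
--     day_of_month = 1
--     title = ''
--
--     titles_of_year = []
--     titles_of_month = []
--
--     entries_of_year = []
--     entries_of_month = []
--     entries_of_day = []
--     for line in split_entries:
--         if '\section' in line:
--             if entries_of_month != []:
--                 # Nothing in entries_of_month before the entry of new year
--                 # New month; add entries for the previous day and month
--                 entries_of_month.append((day_of_month, entries_of_day))
--                 entries_of_year.append(entries_of_month)
--
--                 # add titles for previous month
--                 titles_of_year.append(titles_of_month)
--
--                 day_of_month = 1
--                 title = ''
--                 entries_of_day = []
--                 entries_of_month = []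
--                 titles_of_month = []
--         elif '\subsection' in line:
--             if entries_of_day != []:
--                 # Nothing in entries_of_day on first entry of new month
--                 # Add entries for the previous day
--                 entries_of_month.append((day_of_month, entries_of_day))
--                 entries_of_day = []
--
--             # Add title of day
--             start_idx = len('\subsection{')
--             end_idx = len(line) - 1
--             title = line[start_idx:end_idx]
--             titles_of_month.append(title)
--
--             day_of_month += 1
--         elif not ('%' in line and '\%' not in line):
--             if line != '' or (line == '' and title == 'N/A'):
--                 # Fill in missing entries with ''
--                 # Ignore comment-only lines
--                 entries_of_day.append(line)
--
--     # Add entries for last day and month of the year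
--     entries_of_month.append((day_of_month, entries_of_day))
--     entries_of_year.append(entries_of_month)
--     # Add titles for the last month of the year
--     titles_of_year.append(titles_of_month)
--
--     return entries_of_year, titles_of_year
-- ===== SOURCE B (Python) =====
-- def processTEX(raw_tex):
--     """Two-phase re-implementation: tokenize lines into events, then parse
--     months one at a time (a non-flushing \\section line is a no-op)."""
--     start_idx = raw_tex.find('\section{January}')
--     end_idx = raw_tex.find('\end{document}')
--     lines = raw_tex[start_idx:end_idx].splitlines()
--     events = _tokenize(lines)
--     return _year(events)
--
--
-- def _tokenize(lines):
--     """Classify each line once; comment-only lines are dropped here."""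
--     events = []
--     for line in lines:
--         if '\section' in line:
--             events.append(('S', ''))
--         elif '\subsection' in line:
--             events.append(('U', line[len('\subsection{'):len(line) - 1]))
--         elif '\%' in line or '%' not in line:
--             events.append(('L', line))
--     return events
--
--
-- def _month(events, i):
--     """Parse one month starting at event index i; return its days, its titles
--     and the index after the terminating section line (None at end of input)."""
--     days, titles, acc = [], [], []
--     day, title = 1, ''
--     while i < len(events):
--         kind, payload = events[i]
--         i += 1
--         if kind == 'S':
--             if days:
--                 days.append((day, acc))
--                 return days, titles, i
--         elif kind == 'U':
--             if acc:
--                 days.append((day, acc))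
--                 acc = []
--             titles.append(payload)
--             day += 1
--             title = payload
--         elif payload != '' or title == 'N/A':
--             acc.append(payload)
--     days.append((day, acc))
--     return days, titles, None
--
--
-- def _year(events):
--     months, ytitles = [], []
--     i = 0
--     while i is not None:
--         days, titles, i = _month(events, i)
--         months.append(days)
--         ytitles.append(titles)
--     return months, ytitles
-- ===== Notes on version B (the rewrite author's own statement) =====
-- stated objective: alternative
-- what changed: A's single monolithic loop carrying seven pieces of mutable state is replaced by a two-phase design: one tokenization pass that classifies each line into section/subsection/content events (dropping comment lines), followed by a month-at-a-time parser that consumes the event stream and emits one (days, titles) block per flushed month.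
import Mathlib
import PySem

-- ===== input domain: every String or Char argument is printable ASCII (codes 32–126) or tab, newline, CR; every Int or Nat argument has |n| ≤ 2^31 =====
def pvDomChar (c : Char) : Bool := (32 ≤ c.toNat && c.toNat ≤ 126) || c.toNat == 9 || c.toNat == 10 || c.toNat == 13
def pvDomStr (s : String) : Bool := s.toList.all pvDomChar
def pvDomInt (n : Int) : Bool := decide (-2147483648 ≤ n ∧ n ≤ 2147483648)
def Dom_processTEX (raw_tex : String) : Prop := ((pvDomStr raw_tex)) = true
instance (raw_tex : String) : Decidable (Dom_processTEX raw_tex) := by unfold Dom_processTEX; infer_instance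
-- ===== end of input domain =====

-- B replaces A's single monolithic state-machine loop by a two-phase design
-- (tokenize the lines into events once, then parse month by month);
-- objective: alternative — same cost, different decomposition.

-- ===== PORT A =====
-- A's mutable loop state: day_of_month, title, titles_of_year, titles_of_month,
-- entries_of_year, entries_of_month, entries_of_day.
structure PvAState where
  day : Int
  title : String
  ty : List (List String)
  tm : List String
  ey : List (List (Int × List String))
  em : List (Int × List String)
  ed : List String
deriving Repr, DecidableEq

-- the body of A's for-loop, one line at a time
def pvAStep (st : PvAState) (line : String) : PvAState :=
  if PySem.Str.isIn "\\section" line then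
    if st.em ≠ [] then
      ⟨1, "", st.ty ++ [st.tm], [], st.ey ++ [st.em ++ [(st.day, st.ed)]], [], []⟩
    else st
  else if PySem.Str.isIn "\\subsection" line then
    let st1 := if st.ed ≠ [] then { st with em := st.em ++ [(st.day, st.ed)], ed := [] } else st
    let title := PySem.Str.slice line (some 12) (some (PySem.Str.len line - 1))
    { st1 with title := title, tm := st1.tm ++ [title], day := st1.day + 1 }
  else if !(PySem.Str.isIn "%" line && !PySem.Str.isIn "\\%" line) then
    if line ≠ "" ∨ (line = "" ∧ st.title = "N/A") then { st with ed := st.ed ++ [line] } else st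
  else st

-- A's trailing flush: em.append((day, ed)); ey.append(em); ty.append(tm)
def pvFinal (st : PvAState) : (List (List (Int × List String))) × List (List String) :=
  (st.ey ++ [st.em ++ [(st.day, st.ed)]], st.ty ++ [st.tm])

def processTEX (raw_tex : String) : (List (List (Int × List String))) × List (List String) :=
  let start_idx := PySem.Str.find raw_tex "\\section{January}"
  let end_idx := PySem.Str.find raw_tex "\\end{document}"
  let usable_str := PySem.Str.slice raw_tex (some start_idx) (some end_idx)
  let split_entries := PySem.Str.splitlines usable_str
  pvFinal (split_entries.foldl pvAStep ⟨1, "", [], [], [], [], []⟩)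

-- ===== PORT B =====
-- phase 1: classify each line once into ('S',_) / ('U',title) / ('L',line); comments dropped
def pvTok : List String → List (String × String)
  | [] => []
  | line :: rest =>
    if PySem.Str.isIn "\\section" line then ("S", "") :: pvTok rest
    else if PySem.Str.isIn "\\subsection" line then
      ("U", PySem.Str.slice line (some 12) (some (PySem.Str.len line - 1))) :: pvTok rest
    else if PySem.Str.isIn "\\%" line || !PySem.Str.isIn "%" line then ("L", line) :: pvTok rest
    else pvTok rest

-- phase 2: parse one month; returns its days, its titles, and the remaining
-- events after the terminating section line (none at end of input)
def pvMonth : List (String × String) → List (Int × List String) → List String → List String →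
    Int → String → (List (Int × List String) × List String × Option (List (String × String)))
  | [], days, titles, acc, day, _ => (days ++ [(day, acc)], titles, none)
  | (kind, payload) :: rest, days, titles, acc, day, title =>
    if kind = "S" then
      if days ≠ [] then (days ++ [(day, acc)], titles, some rest)
      else pvMonth rest days titles acc day title
    else if kind = "U" then
      if acc ≠ [] then pvMonth rest (days ++ [(day, acc)]) (titles ++ [payload]) [] (day + 1) payload
      else pvMonth rest days (titles ++ [payload]) acc (day + 1) payload
    else if payload ≠ "" ∨ title = "N/A" then pvMonth rest days titles (acc ++ [payload]) day title
    else pvMonth rest days titles acc day title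

-- termination measure for pvYear: a flushed month always consumes at least its section line
theorem pvMonth_rest_lt : ∀ (evs : List (String × String)) (days : List (Int × List String))
    (titles acc : List String) (day : Int) (title : String)
    {d : List (Int × List String)} {t : List String} {rest : List (String × String)},
    pvMonth evs days titles acc day title = (d, t, some rest) → rest.length < evs.length := by
  intro evs
  induction evs with
  | nil => intro _ _ _ _ _ _ _ _ h; simp [pvMonth] at h
  | cons e tail ih =>
    intro days titles acc day title d t rest h
    obtain ⟨kind, payload⟩ := e
    simp only [pvMonth] at h
    split_ifs at h with h1 h2 h3 h4 h5
    · simp only [Prod.mk.injEq] at h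
      obtain ⟨-, -, hr⟩ := h
      cases hr; simp
    · exact Nat.lt_trans (ih _ _ _ _ _ h) (by simp)
    · exact Nat.lt_trans (ih _ _ _ _ _ h) (by simp)
    · exact Nat.lt_trans (ih _ _ _ _ _ h) (by simp)
    · exact Nat.lt_trans (ih _ _ _ _ _ h) (by simp)
    · exact Nat.lt_trans (ih _ _ _ _ _ h) (by simp)

def pvYear (events : List (String × String)) :
    (List (List (Int × List String))) × List (List String) :=
  match _h : pvMonth events [] [] [] 1 "" with
  | (days, titles, none) => ([days], [titles])
  | (days, titles, some rest) =>
    let p := pvYear rest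
    (days :: p.1, titles :: p.2)
termination_by events.length
decreasing_by exact pvMonth_rest_lt events [] [] [] 1 "" _h

def processTEX_alt (raw_tex : String) : (List (List (Int × List String))) × List (List String) :=
  let start_idx := PySem.Str.find raw_tex "\\section{January}"
  let end_idx := PySem.Str.find raw_tex "\\end{document}"
  let lines := PySem.Str.splitlines (PySem.Str.slice raw_tex (some start_idx) (some end_idx))
  pvYear (pvTok lines)

-- ===== PRECONDITION & SPEC =====
def Spec_processTEX (raw_tex : String) (out : (List (List (Int × List String))) × List (List String)) : Prop := out = processTEX_alt raw_tex
instance (raw_tex : String) (out : (List (List (Int × List String))) × List (List String)) : Decidable (Spec_processTEX raw_tex out) := by unfold Spec_processTEX; infer_instance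

-- ===== CLAIM (what is proved, stated in full; the proofs are below) =====
def Claim_equal_processTEX : Prop := ∀ (raw_tex : String), Dom_processTEX raw_tex → Spec_processTEX raw_tex (processTEX raw_tex)

-- ===== LEMMAS AND PROOFS =====

-- A's loop body expressed on an already-classified event
def pvEStep (st : PvAState) (e : String × String) : PvAState :=
  if e.1 = "S" then
    if st.em ≠ [] then
      ⟨1, "", st.ty ++ [st.tm], [], st.ey ++ [st.em ++ [(st.day, st.ed)]], [], []⟩
    else st
  else if e.1 = "U" then
    let st1 := if st.ed ≠ [] then { st with em := st.em ++ [(st.day, st.ed)], ed := [] } else st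
    { st1 with title := e.2, tm := st1.tm ++ [e.2], day := st1.day + 1 }
  else if e.2 ≠ "" ∨ st.title = "N/A" then { st with ed := st.ed ++ [e.2] } else st

-- B's tokenizer on a single line
def pvTok1 (line : String) : Option (String × String) :=
  if PySem.Str.isIn "\\section" line then some ("S", "")
  else if PySem.Str.isIn "\\subsection" line then
    some ("U", PySem.Str.slice line (some 12) (some (PySem.Str.len line - 1)))
  else if PySem.Str.isIn "\\%" line || !PySem.Str.isIn "%" line then some ("L", line)
  else none

theorem pvTok_cons (line : String) (rest : List String) :
    pvTok (line :: rest) = match pvTok1 line with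
      | none => pvTok rest
      | some e => e :: pvTok rest := by
  rw [pvTok]
  unfold pvTok1
  split_ifs <;> rfl

set_option maxHeartbeats 2000000 in
theorem pvAStep_eq (st : PvAState) (line : String) :
    pvAStep st line = match pvTok1 line with
      | none => st
      | some e => pvEStep st e := by
  unfold pvAStep pvTok1 pvEStep
  split_ifs <;>
      first
        | rfl
        | tauto
        | (simp only [String.reduceEq, reduceIte]
           first | rfl | tauto | (split_ifs <;> first | rfl | tauto))
        | (simp_all
           try tauto)

-- folding A's loop over the lines is folding pvEStep over B's token stream
theorem pvFoldA_eq_foldE : ∀ (lines : List String) (st : PvAState),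
    lines.foldl pvAStep st = (pvTok lines).foldl pvEStep st := by
  intro lines
  induction lines with
  | nil => intro st; rfl
  | cons line rest ih =>
    intro st
    rw [List.foldl_cons, pvTok_cons, pvAStep_eq]
    cases h : pvTok1 line <;> simp [ih]

-- B's year parser generalized to start mid-month (proof helper)
def pvYearFrom (events : List (String × String)) (days : List (Int × List String))
    (titles acc : List String) (day : Int) (title : String) :
    (List (List (Int × List String))) × List (List String) :=
  match _h : pvMonth events days titles acc day title with
  | (d, t, none) => ([d], [t])
  | (d, t, some rest) =>
    let p := pvYearFrom rest [] [] [] 1 ""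
    (d :: p.1, t :: p.2)
termination_by events.length
decreasing_by exact pvMonth_rest_lt events days titles acc day title _h

theorem pvYear_eq_yearFrom : ∀ (events : List (String × String)),
    pvYear events = pvYearFrom events [] [] [] 1 "" := by
  intro events
  generalize hn : events.length = n
  induction n using Nat.strong_induction_on generalizing events with
  | _ n ih =>
    subst hn
    rw [pvYear, pvYearFrom]
    cases h : pvMonth events [] [] [] 1 "" with
    | mk days p =>
      obtain ⟨titles, rest?⟩ := p
      cases rest? with
      | none => rfl
      | some rest =>
        have := ih rest.length (pvMonth_rest_lt events [] [] [] 1 "" h) rest rfl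
        simp [this]

-- pvYearFrom only looks at events through pvMonth
theorem pvYearFrom_congr {evs1 evs2 : List (String × String)}
    {d1 d2 : List (Int × List String)} {t1 a1 t2 a2 : List String} {dy1 dy2 : Int}
    {ti1 ti2 : String}
    (h : pvMonth evs1 d1 t1 a1 dy1 ti1 = pvMonth evs2 d2 t2 a2 dy2 ti2) :
    pvYearFrom evs1 d1 t1 a1 dy1 ti1 = pvYearFrom evs2 d2 t2 a2 dy2 ti2 := by
  rw [pvYearFrom, pvYearFrom, h]

-- the loop invariant: A's fold-then-flush equals B's month-by-month parse
theorem pvMain : ∀ (events : List (String × String)) (day : Int) (title : String)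
    (ty : List (List String)) (tm : List String) (ey : List (List (Int × List String)))
    (em : List (Int × List String)) (ed : List String),
    pvFinal (events.foldl pvEStep ⟨day, title, ty, tm, ey, em, ed⟩)
    = (ey ++ (pvYearFrom events em tm ed day title).1,
       ty ++ (pvYearFrom events em tm ed day title).2) := by
  intro events
  induction events with
  | nil =>
    intro day title ty tm ey em ed
    rw [pvYearFrom]
    simp [pvMonth, pvFinal]
  | cons e rest ih =>
    intro day title ty tm ey em ed
    obtain ⟨kind, payload⟩ := e
    simp only [List.foldl_cons]
    by_cases hk : kind = "S"
    · subst hk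
      by_cases hem : em = []
      · have hstep : pvEStep ⟨day, title, ty, tm, ey, em, ed⟩ ("S", payload)
            = ⟨day, title, ty, tm, ey, em, ed⟩ := by simp [pvEStep, hem]
        rw [hstep, ih, pvYearFrom_congr (show pvMonth (("S", payload) :: rest) em tm ed day title
            = pvMonth rest em tm ed day title from by simp [pvMonth, hem])]
      · have hstep : pvEStep ⟨day, title, ty, tm, ey, em, ed⟩ ("S", payload)
            = ⟨1, "", ty ++ [tm], [], ey ++ [em ++ [(day, ed)]], [], []⟩ := by
          simp [pvEStep, hem]
        have hyf : pvYearFrom (("S", payload) :: rest) em tm ed day title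
            = ((em ++ [(day, ed)]) :: (pvYearFrom rest [] [] [] 1 "").1,
               tm :: (pvYearFrom rest [] [] [] 1 "").2) := by
          rw [pvYearFrom, show pvMonth (("S", payload) :: rest) em tm ed day title
            = (em ++ [(day, ed)], tm, some rest) from by simp [pvMonth, hem]]
        rw [hstep, ih, hyf]
        simp
    · by_cases hu : kind = "U"
      · subst hu
        by_cases hed : ed = []
        · have hstep : pvEStep ⟨day, title, ty, tm, ey, em, ed⟩ ("U", payload)
              = ⟨day + 1, payload, ty, tm ++ [payload], ey, em, ed⟩ := by
            simp [pvEStep, hed]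
          rw [hstep, ih, pvYearFrom_congr (show pvMonth (("U", payload) :: rest) em tm ed day title
              = pvMonth rest em (tm ++ [payload]) ed (day + 1) payload from by
                simp [pvMonth, hed])]
        · have hstep : pvEStep ⟨day, title, ty, tm, ey, em, ed⟩ ("U", payload)
              = ⟨day + 1, payload, ty, tm ++ [payload], ey, em ++ [(day, ed)], []⟩ := by
            simp [pvEStep, hed]
          rw [hstep, ih, pvYearFrom_congr (show pvMonth (("U", payload) :: rest) em tm ed day title
              = pvMonth rest (em ++ [(day, ed)]) (tm ++ [payload]) [] (day + 1) payload from by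
                simp [pvMonth, hed])]
      · by_cases hl : payload ≠ "" ∨ title = "N/A"
        · have hstep : pvEStep ⟨day, title, ty, tm, ey, em, ed⟩ (kind, payload)
              = ⟨day, title, ty, tm, ey, em, ed ++ [payload]⟩ := by
            simp [pvEStep, hk, hu, hl]
          rw [hstep, ih, pvYearFrom_congr (show pvMonth ((kind, payload) :: rest) em tm ed day title
              = pvMonth rest em tm (ed ++ [payload]) day title from by simp [pvMonth, hk, hu, hl])]
        · have hstep : pvEStep ⟨day, title, ty, tm, ey, em, ed⟩ (kind, payload)
              = ⟨day, title, ty, tm, ey, em, ed⟩ := by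
            simp [pvEStep, hk, hu]
            tauto
          rw [hstep, ih, pvYearFrom_congr (show pvMonth ((kind, payload) :: rest) em tm ed day title
              = pvMonth rest em tm ed day title from by
                simp [pvMonth, hk, hu]
                tauto)]

-- ===== VERDICT (by name: the statement is the Claim_ definition above) =====
theorem processTEX_spec : Claim_equal_processTEX := by
  intro raw_tex _
  unfold Spec_processTEX processTEX processTEX_alt
  simp only [pvFoldA_eq_foldE, pvYear_eq_yearFrom, pvMain]
  simp
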